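-- pv_equiv track=rewrite | github.com/pvial00/Uvajda-Counter | bit_flip_counting_machine.py | venus_counterB
-- ===== SOURCE A (Python) =====
-- def venus_counterB(bit_stream, bit_stream_length, level=1):
--     r = [0, 1]
--     c = 1
--     q = 0
--     for x in range(bit_stream_length-level):
--         q ^= bit_stream[x]
--         r[c] ^= q
--         c = (c + 1) & 0x01
--     if r[0] == 1:
--         return 1
--     else:
--         return 0
-- ===== SOURCE B (Python) =====
-- def venus_counterB(bit_stream, bit_stream_length, level=1):
--     # Each bit_stream[i] lands in the result iff it falls into an odd number of
--     # the odd-position prefix XORs, i.e. iff (N//2 - i//2) is odd, N = length - level.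
--     n = bit_stream_length - level
--     res = 0
--     for i in range(n):
--         if (n // 2 - i // 2) & 1:
--             res ^= bit_stream[i]
--     return 1 if res == 1 else 0
-- ===== Notes on version B (the rewrite author's own statement) =====
-- stated objective: alternative
-- what changed: B drops A's running prefix-XOR accumulator and the alternating two-slot array: it XORs bit_stream[i] directly into a single result exactly when the count N//2 - i//2 of odd positions at or after i is odd.
import Mathlib
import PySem

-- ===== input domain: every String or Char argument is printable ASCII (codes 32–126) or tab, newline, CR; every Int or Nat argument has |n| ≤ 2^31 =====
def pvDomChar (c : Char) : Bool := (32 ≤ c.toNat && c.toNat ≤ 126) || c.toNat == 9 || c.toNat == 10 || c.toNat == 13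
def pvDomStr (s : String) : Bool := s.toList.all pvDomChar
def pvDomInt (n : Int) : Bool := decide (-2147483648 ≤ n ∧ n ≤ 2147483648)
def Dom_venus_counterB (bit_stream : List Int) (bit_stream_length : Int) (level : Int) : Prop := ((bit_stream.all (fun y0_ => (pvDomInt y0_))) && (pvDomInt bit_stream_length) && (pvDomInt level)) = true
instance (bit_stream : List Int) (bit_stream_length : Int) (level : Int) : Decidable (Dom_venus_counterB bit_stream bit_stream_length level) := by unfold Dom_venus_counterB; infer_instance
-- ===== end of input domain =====

-- B replaces A's running prefix-XOR accumulator and alternating two-slot array by a single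
-- result into which bit_stream[i] is XORed exactly when N//2 - i//2 is odd (alternative
-- decomposition, same O(n) cost).

-- ===== PORT A =====
-- Loop body of A: state is (r[0], r[1], c, q).  c is always 0 or 1 (it starts at 1 and is
-- updated by c = (c + 1) & 1), so `r[c] ^= q` is the pair of guarded updates below.
def pvStepA (st : Int × Int × Int × Int) (v : Int) : Int × Int × Int × Int :=
  let q := PySem.Int.bxor st.2.2.2 v
  let r0 := if st.2.2.1 == 0 then PySem.Int.bxor st.1 q else st.1
  let r1 := if st.2.2.1 == 1 then PySem.Int.bxor st.2.1 q else st.2.1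
  (r0, r1, PySem.Int.band (st.2.2.1 + 1) 1, q)

def venus_counterB (bit_stream : List Int) (bit_stream_length : Int) (level : Int) : Int :=
  -- r = [0, 1]; c = 1; q = 0; for x in range(bit_stream_length - level): ...
  let s := (PySem.List.pyRange 0 (bit_stream_length - level) 1).foldl
    (fun st x => pvStepA st (PySem.List.pyGetD bit_stream x 0)) (0, 1, 1, 0)
  if s.1 == 1 then 1 else 0

-- ===== PORT B =====
def venus_counterB_alt (bit_stream : List Int) (bit_stream_length : Int) (level : Int) : Int :=
  let n := bit_stream_length - level
  let res := (PySem.List.pyRange 0 n 1).foldl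
    (fun res i =>
      if PySem.Int.band (PySem.Int.floordiv n 2 - PySem.Int.floordiv i 2) 1 ≠ 0 then
        PySem.Int.bxor res (PySem.List.pyGetD bit_stream i 0)
      else res) 0
  if res == 1 then 1 else 0

-- ===== PRECONDITION & SPEC =====
-- A (and B) raise IndexError when the loop reads past the end of bit_stream, i.e. when
-- bit_stream_length - level > len(bit_stream); Pre_ excludes exactly those inputs.
def Pre_venus_counterB (bit_stream : List Int) (bit_stream_length : Int) (level : Int) : Prop :=
  bit_stream_length - level ≤ (bit_stream.length : Int)
instance (bit_stream : List Int) (bit_stream_length : Int) (level : Int) : Decidable (Pre_venus_counterB bit_stream bit_stream_length level) := by unfold Pre_venus_counterB; infer_instance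

def pvWitness_venus_counterB : List Int × Int × Int := ([1, 0, 1], 3, 1)

def Spec_venus_counterB (bit_stream : List Int) (bit_stream_length : Int) (level : Int) (out : Int) : Prop := out = venus_counterB_alt bit_stream bit_stream_length level
instance (bit_stream : List Int) (bit_stream_length : Int) (level : Int) (out : Int) : Decidable (Spec_venus_counterB bit_stream bit_stream_length level out) := by unfold Spec_venus_counterB; infer_instance

-- ===== CLAIM (what is proved, stated in full; the proofs are below) =====
def Claim_equal_venus_counterB : Prop := ∀ (bit_stream : List Int) (bit_stream_length : Int) (level : Int), Dom_venus_counterB bit_stream bit_stream_length level → Pre_venus_counterB bit_stream bit_stream_length level → Spec_venus_counterB bit_stream bit_stream_length level (venus_counterB bit_stream bit_stream_length level)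

-- ===== LEMMAS AND PROOFS =====

-- bxor on the two Int constructors (the prelude has comm/self/zero but no assoc; these
-- four reductions give assoc by case analysis).
theorem pvBxor_ofNat (m n : Nat) :
    PySem.Int.bxor (Int.ofNat m) (Int.ofNat n) = Int.ofNat (m ^^^ n) := by
  simp [PySem.Int.bxor]

theorem pvBxor_negSucc_ofNat (m n : Nat) :
    PySem.Int.bxor (Int.negSucc m) (Int.ofNat n) = Int.negSucc (m ^^^ n) := by
  have h1 : ¬ (0 : Int) ≤ Int.negSucc m := by omega
  simp [PySem.Int.bxor, h1, Int.negSucc_eq]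
  omega

theorem pvBxor_ofNat_negSucc (m n : Nat) :
    PySem.Int.bxor (Int.ofNat m) (Int.negSucc n) = Int.negSucc (m ^^^ n) := by
  rw [PySem.Int.bxor_comm, pvBxor_negSucc_ofNat, Nat.xor_comm]

theorem pvBxor_negSucc_negSucc (m n : Nat) :
    PySem.Int.bxor (Int.negSucc m) (Int.negSucc n) = Int.ofNat (m ^^^ n) := by
  have h1 : ¬ (0 : Int) ≤ Int.negSucc m := by omega
  have h1' : ¬ (0 : Int) ≤ Int.negSucc n := by omega
  simp [PySem.Int.bxor, h1, h1']

theorem pvBxor_assoc (a b c : Int) :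
    PySem.Int.bxor (PySem.Int.bxor a b) c = PySem.Int.bxor a (PySem.Int.bxor b c) := by
  cases a <;> cases b <;> cases c <;>
    simp only [pvBxor_ofNat, pvBxor_negSucc_ofNat, pvBxor_ofNat_negSucc,
      pvBxor_negSucc_negSucc, Nat.xor_assoc]

theorem pvBxor_left_comm (a b c : Int) :
    PySem.Int.bxor a (PySem.Int.bxor b c) = PySem.Int.bxor b (PySem.Int.bxor a c) := by
  rw [← pvBxor_assoc, PySem.Int.bxor_comm a b, pvBxor_assoc]

theorem pvBxor_cancel_left (a b : Int) :
    PySem.Int.bxor a (PySem.Int.bxor a b) = b := by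
  rw [← pvBxor_assoc, PySem.Int.bxor_self, PySem.Int.bxor_comm, PySem.Int.bxor_zero]

-- A's final r[0], computed by consuming the read values two at a time: starting at c = 1,
-- r[0] absorbs the prefix XOR exactly after every second read.
def pvFA : List Int → Int → Int → Int
  | [], _, r0 => r0
  | [_], _, r0 => r0
  | a :: b :: l, q, r0 =>
      pvFA l (PySem.Int.bxor (PySem.Int.bxor q a) b)
        (PySem.Int.bxor r0 (PySem.Int.bxor (PySem.Int.bxor q a) b))

-- B's result, consumed two values at a time; m counts the remaining full pairs.
def pvFB : List Int → Nat → Int → Int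
  | [], _, res => res
  | [_], _, res => res
  | a :: b :: l, m, res =>
      pvFB l (m - 1) (if m % 2 = 1 then PySem.Int.bxor (PySem.Int.bxor res a) b else res)

theorem pvBand_two_one : PySem.Int.band 2 1 = 0 := by decide

-- A's fold equals pvFA.
theorem pvLA : ∀ (l : List Int) (r0 r1 q : Int),
    (l.foldl pvStepA (r0, r1, 1, q)).1 = pvFA l q r0
  | [], r0, r1, q => rfl
  | [a], r0, r1, q => by
      simp [List.foldl, pvStepA, pvFA, pvBand_two_one]
  | a :: b :: l, r0, r1, q => by
      have hstep : (a :: b :: l).foldl pvStepA (r0, r1, 1, q)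
          = l.foldl pvStepA (PySem.Int.bxor r0 (PySem.Int.bxor (PySem.Int.bxor q a) b),
              PySem.Int.bxor r1 (PySem.Int.bxor q a), 1,
              PySem.Int.bxor (PySem.Int.bxor q a) b) := by
        simp [List.foldl, pvStepA, pvBand_two_one]
      rw [hstep, pvLA l, pvFA]

-- the loop-body condition of B at an even index 2*k (and at 2*k+1), as a Nat parity
theorem pvCond (n k : Nat) (hk : 2 * k ≤ n) (i : Int) (hi : PySem.Int.floordiv i 2 = (k : Int)) :
    (PySem.Int.band (PySem.Int.floordiv (n : Int) 2 - PySem.Int.floordiv i 2) 1 ≠ 0)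
      ↔ ((n / 2 - k) % 2 = 1) := by
  rw [hi, PySem.Int.floordiv_eq_ediv_of_pos (by norm_num)]
  have hcast : ((n : Int) / 2 - (k : Int)) = ((n / 2 - k : Nat) : Int) := by omega
  rw [hcast, PySem.Int.band_one, PySem.Int.mod_eq_emod_of_pos (by norm_num)]
  omega

-- B's fold over the tail of the range, from an even start index 2*k, equals pvFB on the
-- corresponding slice of the stream.
theorem pvLB (bs : List Int) (n : Nat) (hn : n ≤ bs.length) :
    ∀ (k : Nat) (res : Int), 2 * k ≤ n →
    (PySem.List.pyRange ((2 * k : Nat) : Int) (n : Int) 1).foldl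
      (fun res i =>
        if PySem.Int.band (PySem.Int.floordiv (n : Int) 2 - PySem.Int.floordiv i 2) 1 ≠ 0 then
          PySem.Int.bxor res (PySem.List.pyGetD bs i 0)
        else res) res
      = pvFB ((bs.drop (2 * k)).take (n - 2 * k)) (n / 2 - k) res := by
  intro k res hk
  rcases Nat.lt_or_ge (2 * k + 1) n with hlt | hge
  · -- at least two indices left: peel 2*k and 2*k+1 and recurse at k+1
    have hk1 : 2 * k < bs.length := by omega
    have hk2 : 2 * k + 1 < bs.length := by omega
    have hd1 : PySem.Int.floordiv ((2 * k : Nat) : Int) 2 = (k : Int) := by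
      rw [PySem.Int.floordiv_eq_ediv_of_pos (by norm_num)]; omega
    have hd2 : PySem.Int.floordiv (((2 * k : Nat) : Int) + 1) 2 = (k : Int) := by
      rw [PySem.Int.floordiv_eq_ediv_of_pos (by norm_num)]; omega
    rw [PySem.List.pyRange_one_cons (by omega), PySem.List.pyRange_one_cons (by omega)]
    simp only [List.foldl]
    have hg1 : PySem.List.pyGetD bs ((2 * k : Nat) : Int) 0 = bs[2 * k] := by
      rw [PySem.List.pyGetD_eq_getElem bs 0 (by omega) (by exact_mod_cast hk1)]
      congr 1
      all_goals omega
    have hg2 : PySem.List.pyGetD bs (((2 * k : Nat) : Int) + 1) 0 = bs[2 * k + 1] := by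
      rw [PySem.List.pyGetD_eq_getElem bs 0 (by omega) (by push_cast; omega)]
      congr 1
      all_goals omega
    have hrange : (((2 * k : Nat) : Int) + 1 + 1) = ((2 * (k + 1) : Nat) : Int) := by omega
    rw [hrange, pvLB bs n hn (k + 1) _ (by omega)]
    -- identify the two slices
    have hsplit : (bs.drop (2 * k)).take (n - 2 * k)
        = bs[2 * k] :: bs[2 * k + 1] :: (bs.drop (2 * (k + 1))).take (n - 2 * (k + 1)) := by
      rw [List.drop_eq_getElem_cons hk1, List.drop_eq_getElem_cons hk2]
      have h1 : n - 2 * k = (n - (2 * k + 1)) + 1 := by omega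
      have h2 : n - (2 * k + 1) = (n - 2 * (k + 1)) + 1 := by omega
      rw [h1, List.take_succ_cons, h2, List.take_succ_cons]
      congr 2
    rw [hsplit]
    simp only [pvFB]
    have hm : n / 2 - k - 1 = n / 2 - (k + 1) := by omega
    rw [hm]
    by_cases hc : (n / 2 - k) % 2 = 1
    · rw [if_pos ((pvCond n k hk _ hd1).mpr hc), if_pos ((pvCond n k hk _ hd2).mpr hc),
        if_pos hc, hg1, hg2]
    · rw [if_neg (fun h => hc ((pvCond n k hk _ hd1).mp h)),
        if_neg (fun h => hc ((pvCond n k hk _ hd2).mp h)), if_neg hc]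
  · rcases Nat.lt_or_ge (2 * k) n with hlt' | hge'
    · -- exactly one index left: its condition is (n/2 - n/2) & 1 = 0, and pvFB ignores a
      -- trailing singleton
      have hn1 : n = 2 * k + 1 := by omega
      have hd1 : PySem.Int.floordiv ((2 * k : Nat) : Int) 2 = (k : Int) := by
        rw [PySem.Int.floordiv_eq_ediv_of_pos (by norm_num)]; omega
      rw [PySem.List.pyRange_one_cons (by omega), PySem.List.pyRange_one_eq_nil (by omega)]
      simp only [List.foldl]
      have hc : ¬ (PySem.Int.band (PySem.Int.floordiv (n : Int) 2
          - PySem.Int.floordiv ((2 * k : Nat) : Int) 2) 1 ≠ 0) := by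
        rw [pvCond n k hk _ hd1]; omega
      rw [if_neg hc]
      have hone : (bs.drop (2 * k)).take (n - 2 * k) = [bs[2 * k]] := by
        rw [List.drop_eq_getElem_cons (by omega)]
        have h1 : n - 2 * k = 1 := by omega
        rw [h1, List.take_succ_cons, List.take_zero]
      rw [hone]
      rfl
    · -- no index left
      have h0 : n - 2 * k = 0 := by omega
      rw [PySem.List.pyRange_one_eq_nil (by omega)]
      simp [h0, pvFB]
  termination_by k => n - 2 * k
  decreasing_by omega

-- the bridge: pvFA and pvFB agree under the stated accumulator invariant
theorem pvJ : ∀ (l : List Int) (q r0 res : Int),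
    r0 = PySem.Int.bxor res (if (l.length / 2) % 2 = 1 then q else 0) →
    pvFA l q r0 = pvFB l (l.length / 2) res
  | [], q, r0, res => by
      intro h; simpa [pvFA, pvFB] using h
  | [a], q, r0, res => by
      intro h; simpa [pvFA, pvFB] using h
  | a :: b :: l, q, r0, res => by
      intro h
      have hlen : (a :: b :: l).length / 2 = l.length / 2 + 1 := by
        simp [List.length_cons]; omega
      rw [hlen] at h
      simp only [pvFA, pvFB, hlen]
      have hm1 : l.length / 2 + 1 - 1 = l.length / 2 := by omega
      rw [hm1]
      apply pvJ
      rw [h]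
      by_cases hp : (l.length / 2) % 2 = 1
      · have hp' : ¬ ((l.length / 2 + 1) % 2 = 1) := by omega
        simp only [if_pos hp, if_neg hp']
        simp [PySem.Int.bxor_comm, pvBxor_left_comm]
      · have hp' : (l.length / 2 + 1) % 2 = 1 := by omega
        simp only [if_neg hp, if_pos hp']
        simp [PySem.Int.bxor_comm, pvBxor_left_comm, pvBxor_cancel_left]

-- glue for A: the index fold over range(n) is the value fold over the first n elements
theorem pvAGlue (bs : List Int) (n : Nat) (hn : n ≤ bs.length) (init : Int × Int × Int × Int) :
    (PySem.List.pyRange 0 (n : Int) 1).foldl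
      (fun st x => pvStepA st (PySem.List.pyGetD bs x 0)) init
      = (bs.take n).foldl pvStepA init := by
  have hlen : ((bs.take n).length : Int) = (n : Int) := by
    simp [List.length_take]; omega
  rw [← hlen, PySem.List.foldl_congr_mem _ _
      (fun st x => pvStepA st (PySem.List.pyGetD (bs.take n) x 0)) init ?_,
    PySem.List.foldl_pyRange_zero_pyGetD' (bs.take n) 0 pvStepA init]
  intro acc x hx
  rw [PySem.List.mem_pyRange_one] at hx
  show pvStepA acc (PySem.List.pyGetD bs x 0) = pvStepA acc (PySem.List.pyGetD (bs.take n) x 0)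
  have hx1 : 0 ≤ x := hx.1
  have hx2 : x < ((bs.take n).length : Int) := hx.2
  have hx2' : x < (bs.length : Int) := by rw [hlen] at hx2; omega
  rw [PySem.List.pyGetD_eq_getElem bs 0 hx1 hx2',
    PySem.List.pyGetD_eq_getElem (bs.take n) 0 hx1 hx2, List.getElem_take]

-- ===== VERDICT (by name: the statement is the Claim_ definition above) =====
theorem venus_counterB_spec : Claim_equal_venus_counterB := by
  intro bs bl lvl _hdom hpre
  unfold Spec_venus_counterB venus_counterB venus_counterB_alt
  unfold Pre_venus_counterB at hpre
  dsimp only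
  by_cases hN : bl - lvl ≤ 0
  · rw [PySem.List.pyRange_one_eq_nil hN]
    simp
  · rw [Int.not_le] at hN
    set N := bl - lvl with hNdef
    have hn : N = ((N.toNat : Nat) : Int) := by omega
    set n := N.toNat with hndef
    have hnlen : n ≤ bs.length := by omega
    rw [hn, pvAGlue bs n hnlen, pvLA]
    have hB := pvLB bs n hnlen 0 0 (by omega)
    simp only [Nat.mul_zero, Nat.cast_zero, Nat.sub_zero, List.drop_zero] at hB
    rw [hB]
    have hJ : pvFA (bs.take n) 0 0 = pvFB (bs.take n) ((bs.take n).length / 2) 0 := by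
      apply pvJ
      by_cases hp : (((bs.take n).length) / 2) % 2 = 1 <;> simp
    have hlen : (bs.take n).length = n := by simp [List.length_take]; omega
    rw [hlen] at hJ
    rw [hJ]
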